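-- pv_equiv track=rewrite | github.com/antongoransson/advent-of-code-2020 | day18/day18.py | parse
-- ===== SOURCE A (Python) =====
-- def parse(expr):
--     new_expr = []
--     for c in reversed(expr):
--         new_expr.append(c)
--         if c is '+':
--             new_expr.insert(len(new_expr) - 1, '(')
--             new_expr.append(')')
--         if c is '*':
--             new_expr.insert(len(new_expr) - 1, '(')
--             new_expr.insert(len(new_expr) - 1, '(')
--             new_expr.append(')')
--             new_expr.append(')')
--         if c in ')(':
--             new_expr.extend(c * 2)
--     return ['(','('] + list(reversed(new_expr)) + [')', ')']
-- ===== SOURCE B (Python) =====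
-- REP = {'+': ')+(', '*': '))*((', '(': '(((', ')': ')))'}
--
-- def parse(expr):
--     out = ['(', '(']
--     for c in expr:
--         out.extend(REP.get(c, c))
--     out.append(')')
--     out.append(')')
--     return out
-- ===== Notes on version B (the rewrite author's own statement) =====
-- stated objective: simpler
-- what changed: Single forward pass appending a fixed char-to-replacement expansion, replacing A's reversed scan with insert-before-last surgery and a final reversal.
import Mathlib
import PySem

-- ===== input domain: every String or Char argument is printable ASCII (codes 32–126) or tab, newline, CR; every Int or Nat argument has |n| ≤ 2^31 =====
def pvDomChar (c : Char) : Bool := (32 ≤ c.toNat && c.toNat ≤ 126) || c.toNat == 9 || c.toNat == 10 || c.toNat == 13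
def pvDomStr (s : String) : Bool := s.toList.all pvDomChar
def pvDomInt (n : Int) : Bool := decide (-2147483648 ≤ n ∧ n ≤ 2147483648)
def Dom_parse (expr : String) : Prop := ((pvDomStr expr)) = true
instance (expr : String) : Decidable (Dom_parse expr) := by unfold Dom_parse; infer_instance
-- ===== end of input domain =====

-- B replaces A's reversed scan with inserts and a final reversal by one forward pass over a fixed char→replacement map (simpler).


-- ===== PORT A =====
-- one iteration of A's loop body over the reversed characters ('c is "+"' ported as equality: 1-char ASCII strings are interned)
def parseStepA (acc : List String) (c : Char) : List String :=
  let acc1 := acc ++ [String.ofList [c]]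
  let acc2 := if c = '+' then (acc1.insertIdx (acc1.length - 1) "(") ++ [")"] else acc1
  let acc3 := if c = '*' then
      (((acc2.insertIdx (acc2.length - 1) "(").insertIdx
        ((acc2.insertIdx (acc2.length - 1) "(").length - 1) "(")) ++ [")", ")"]
    else acc2
  if c = ')' ∨ c = '(' then acc3 ++ [String.ofList [c], String.ofList [c]] else acc3

def parse (expr : String) : List String :=
  let new_expr := expr.toList.reverse.foldl parseStepA []
  ["(", "("] ++ new_expr.reverse ++ [")", ")"]

-- ===== PORT B =====
def repB : PySem.Dict Char String :=
  PySem.Dict.ofList [('+', ")+("), ('*', "))*(("), ('(', "((("), (')', ")))")]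

def parse_alt (expr : String) : List String :=
  let out := expr.toList.foldl
    (fun acc c => acc ++ ((PySem.Dict.getD repB c (String.ofList [c])).toList.map (fun ch => String.ofList [ch])))
    ["(", "("]
  out ++ [")", ")"]

-- ===== PRECONDITION & SPEC =====
def Spec_parse (expr : String) (out : List String) : Prop := out = parse_alt expr
instance (expr : String) (out : List String) : Decidable (Spec_parse expr out) := by unfold Spec_parse; infer_instance

-- ===== CLAIM (what is proved, stated in full; the proofs are below) =====
def Claim_equal_parse : Prop := ∀ (expr : String), Dom_parse expr → Spec_parse expr (parse expr)

-- ===== LEMMAS AND PROOFS =====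
-- forward expansion of one character in B
def mapB (c : Char) : List String :=
  (PySem.Dict.getD repB c (String.ofList [c])).toList.map (fun ch => String.ofList [ch])

theorem insertIdx_append_singleton (acc : List String) (s x : String) :
    (acc ++ [s]).insertIdx acc.length x = acc ++ [x, s] := by
  induction acc with
  | nil => rfl
  | cons a t ih => simp [List.insertIdx_succ_cons, ih]

theorem ins1 (acc : List String) (s x : String) :
    (acc ++ [s]).insertIdx ((acc ++ [s]).length - 1) x = acc ++ [x, s] := by
  rw [show (acc ++ [s]).length - 1 = acc.length by simp]
  exact insertIdx_append_singleton acc s x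

theorem ins2 (acc : List String) (x s y : String) :
    (acc ++ [x, s]).insertIdx ((acc ++ [x, s]).length - 1) y = acc ++ [x, y, s] := by
  rw [show (acc ++ [x, s]).length - 1 = acc.length + 1 by simp,
      show acc ++ [x, s] = (acc ++ [x]) ++ [s] by simp,
      show acc.length + 1 = (acc ++ [x]).length by simp]
  rw [insertIdx_append_singleton (acc ++ [x]) s y]
  simp

theorem stepA_eq (acc : List String) (c : Char) :
    parseStepA acc c = acc ++ (mapB c).reverse := by
  unfold parseStepA
  by_cases h1 : c = '+'
  · subst h1
    rw [if_neg (show ¬(('+' : Char) = ')' ∨ ('+' : Char) = '(') by decide),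
        if_neg (show ¬(('+' : Char) = '*') by decide),
        if_pos (rfl : ('+' : Char) = '+'), ins1]
    show acc ++ ["(", String.ofList ['+']] ++ [")"] = acc ++ (mapB '+').reverse
    rw [List.append_assoc]
    congr 1
  · by_cases h2 : c = '*'
    · subst h2
      rw [if_neg (show ¬(('*' : Char) = ')' ∨ ('*' : Char) = '(') by decide),
          if_pos (rfl : ('*' : Char) = '*'),
          if_neg (show ¬(('*' : Char) = '+') by decide), ins1, ins2]
      show acc ++ ["(", "(", String.ofList ['*']] ++ [")", ")"] = acc ++ (mapB '*').reverse
      rw [List.append_assoc]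
      congr 1
    · by_cases h3 : c = ')' ∨ c = '('
      · rcases h3 with h | h <;> subst h
        · rw [if_pos (show (')' : Char) = ')' ∨ (')' : Char) = '(' from Or.inl rfl),
              if_neg (show ¬((')' : Char) = '*') by decide),
              if_neg (show ¬((')' : Char) = '+') by decide), List.append_assoc]
          congr 1
        · rw [if_pos (show ('(' : Char) = ')' ∨ ('(' : Char) = '(' from Or.inr rfl),
              if_neg (show ¬(('(' : Char) = '*') by decide),
              if_neg (show ¬(('(' : Char) = '+') by decide), List.append_assoc]
          congr 1
      · rw [if_neg h3, if_neg h2, if_neg h1]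
        have h4 : ¬c = ')' := fun h => h3 (Or.inl h)
        have h5 : ¬c = '(' := fun h => h3 (Or.inr h)
        have hg : PySem.Dict.getD repB c (String.ofList [c]) = String.ofList [c] := by
          simp [repB, PySem.Dict.ofList, PySem.Dict.update, PySem.Dict.getD_insert,
                h1, h2, h4, h5]
        simp [mapB, hg, String.toList_ofList]

theorem foldl_stepA (l : List Char) (acc : List String) :
    l.foldl parseStepA acc = acc ++ l.flatMap (fun c => (mapB c).reverse) := by
  induction l generalizing acc with
  | nil => simp
  | cons a t ih => simp [List.foldl_cons, stepA_eq, ih]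

theorem foldl_mapB (l : List Char) (acc : List String) :
    l.foldl (fun acc c => acc ++ ((PySem.Dict.getD repB c (String.ofList [c])).toList.map (fun ch => String.ofList [ch]))) acc
      = acc ++ l.flatMap mapB := by
  induction l generalizing acc with
  | nil => simp
  | cons a t ih => simp [List.foldl_cons, ih, mapB]

-- ===== VERDICT (by name: the statement is the Claim_ definition above) =====
theorem parse_spec : Claim_equal_parse := by
  intro expr _
  unfold Spec_parse parse parse_alt
  rw [foldl_stepA, foldl_mapB]
  simp [List.reverse_flatMap, Function.comp_def]
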